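-- pv_equiv track=rewrite | github.com/jyan500/Python-Data-Structures-And-Algos | neetcode all and misc questions/Arrays and Strings/Sliding Window/log_spam.py | detectSpam
-- ===== SOURCE A (Python) =====
-- def detectSpam(logs: [dict], limit: int, milliseconds: int):
--     from collections import defaultdict
--     # if amount of logs < limit, there aren't enough
--     # requests to be considered spam, so return empty array
--     if (len(logs) < limit):
--         return []
--     logs.sort(key=lambda x: x["timestamp"])
--     res = set()
--     l = 0
--     counter = defaultdict(int)
--     # initialize count for the first log entry
--     counter[logs[l]["userId"]] += 1
--     for r in range(1, len(logs)):
--         userId = logs[r]["userId"]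
--         timestamp = logs[r]["timestamp"]
--         # if the current timestamp is not in our time window
--         # update the window by incrementing the left pointer
--         # until our current time is within the window
--         while timestamp > logs[l]["timestamp"] + milliseconds:
--             # remove the entry at the left most pointer
--             counter[logs[l]["userId"]] -= 1
--             l += 1
--         # add user id to the hashmap and keep track of count
--         counter[userId] += 1
--         # if the amount in this window exceeds the limit,
--         # add to result
--         if counter[userId] >= limit:
--             res.add(userId)
--
--     return list(res)
-- ===== SOURCE B (Python) =====
-- def detectSpam(logs, limit, milliseconds):
--     # per-user sliding deques instead of A's single global two-pointer counter
--     # (note: like A, this sorts `logs` in place)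
--     from collections import defaultdict, deque
--     if len(logs) < limit:
--         return []
--     logs.sort(key=lambda x: x["timestamp"])
--     windows = defaultdict(deque)
--     res = set()
--     # the first (earliest) log only seeds its user's window; checks start at the second log
--     windows[logs[0]["userId"]].append(logs[0]["timestamp"])
--     for log in logs[1:]:
--         userId = log["userId"]
--         timestamp = log["timestamp"]
--         dq = windows[userId]
--         dq.append(timestamp)
--         while dq[0] < timestamp - milliseconds:
--             dq.popleft()
--         if len(dq) >= limit:
--             res.add(userId)
--     return list(res)
-- ===== Notes on version B (the rewrite author's own statement) =====
-- stated objective: alternative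
-- what changed: A maintains one global two-pointer window with a shared counter dict over the sorted logs; B instead keeps a per-user deque of timestamps (dict userId -> deque), appending each timestamp and pruning expired ones from the front, so the window count is just the deque length.
import Mathlib
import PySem

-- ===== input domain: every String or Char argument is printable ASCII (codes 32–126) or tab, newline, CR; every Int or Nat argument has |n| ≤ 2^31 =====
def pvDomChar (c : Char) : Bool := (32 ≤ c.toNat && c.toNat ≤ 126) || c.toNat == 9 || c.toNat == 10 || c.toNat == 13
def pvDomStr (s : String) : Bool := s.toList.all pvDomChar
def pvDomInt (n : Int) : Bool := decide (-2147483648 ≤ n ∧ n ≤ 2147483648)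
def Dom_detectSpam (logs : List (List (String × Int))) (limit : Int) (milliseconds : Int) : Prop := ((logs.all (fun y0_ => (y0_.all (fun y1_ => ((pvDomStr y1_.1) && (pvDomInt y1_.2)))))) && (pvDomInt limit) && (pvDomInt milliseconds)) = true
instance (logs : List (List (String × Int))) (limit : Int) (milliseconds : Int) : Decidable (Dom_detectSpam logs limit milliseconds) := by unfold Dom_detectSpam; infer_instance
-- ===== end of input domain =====

-- B replaces A's single global two-pointer window counter by per-user sliding deques
-- (a dict userId ↦ deque of in-window timestamps, pruned from the front); same return
-- value. Both A and B sort `logs` in place (side effect); the equivalence proved here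
-- is about the return value.

-- ===== PORT A =====
-- d["timestamp"] / d["userId"]; exact where the key is present (guaranteed by Pre_)
def pvTs (d : List (String × Int)) : Int := PySem.Dict.getD ⟨d⟩ "timestamp" 0
def pvUid (d : List (String × Int)) : Int := PySem.Dict.getD ⟨d⟩ "userId" 0

-- A's inner `while timestamp > logs[l]["timestamp"] + milliseconds` loop; fuel-bounded
-- recursion (fuel = len(logs) never runs out inside Pre_, where the loop stops at l ≤ r)
def pvAdvance (ss : List (List (String × Int))) (timestamp milliseconds : Int) :
    Nat → Nat → PySem.Dict Int Int → Nat × PySem.Dict Int Int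
  | 0, l, counter => (l, counter)
  | fuel+1, l, counter =>
    if timestamp > pvTs (ss.getD l []) + milliseconds then
      pvAdvance ss timestamp milliseconds fuel (l+1)
        (PySem.Dict.insert counter (pvUid (ss.getD l []))
          (PySem.Dict.getD counter (pvUid (ss.getD l [])) 0 - 1))
    else (l, counter)

-- body of A's `for r in range(1, len(logs))` loop; state = (l, counter, res)
def pvStepA (ss : List (List (String × Int))) (limit milliseconds : Int)
    (st : Nat × PySem.Dict Int Int × PySem.Set Int) (r : Int) :
    Nat × PySem.Dict Int Int × PySem.Set Int :=
  let userId := pvUid (ss.getD r.toNat [])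
  let timestamp := pvTs (ss.getD r.toNat [])
  let lc := pvAdvance ss timestamp milliseconds ss.length st.1 st.2.1
  let counter := PySem.Dict.insert lc.2 userId (PySem.Dict.getD lc.2 userId 0 + 1)
  let res := if limit ≤ PySem.Dict.getD counter userId 0 then PySem.Set.add st.2.2 userId
             else st.2.2
  (lc.1, counter, res)

def detectSpam (logs : List (List (String × Int))) (limit : Int) (milliseconds : Int) : List Int :=
  if (logs.length : Int) < limit then []
  else
    let ss := PySem.List.sorted logs (fun d => pvTs d)
    -- counter = defaultdict(int); counter[logs[0]["userId"]] += 1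
    let counter0 : PySem.Dict Int Int :=
      PySem.Dict.insert PySem.Dict.empty (pvUid (ss.getD 0 []))
        (PySem.Dict.getD (PySem.Dict.empty : PySem.Dict Int Int) (pvUid (ss.getD 0 [])) 0 + 1)
    ((PySem.List.pyRange 1 (logs.length : Int)).foldl (pvStepA ss limit milliseconds)
      (0, counter0, PySem.Set.empty)).2.2

-- ===== PORT B =====
-- B's `while dq[0] < timestamp - milliseconds: dq.popleft()`; the [] case is where
-- Python's dq[0] would raise IndexError (unreachable inside Pre_)
def pvPrune (threshold : Int) : List Int → List Int
  | [] => []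
  | t :: rest => if t < threshold then pvPrune threshold rest else t :: rest

-- body of B's `for log in logs[1:]` loop; state = (windows, res)
def pvStepB (limit milliseconds : Int)
    (st : PySem.Dict Int (List Int) × PySem.Set Int) (log : List (String × Int)) :
    PySem.Dict Int (List Int) × PySem.Set Int :=
  let userId := pvUid log
  let timestamp := pvTs log
  let dq := PySem.Dict.getD st.1 userId []
  let dq2 := pvPrune (timestamp - milliseconds) (dq ++ [timestamp])
  let windows := PySem.Dict.insert st.1 userId dq2
  let res := if limit ≤ (dq2.length : Int) then PySem.Set.add st.2 userId else st.2
  (windows, res)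

def detectSpam_alt (logs : List (List (String × Int))) (limit : Int) (milliseconds : Int) : List Int :=
  if (logs.length : Int) < limit then []
  else
    let ss := PySem.List.sorted logs (fun d => pvTs d)
    -- windows = defaultdict(deque); windows[logs[0]["userId"]].append(logs[0]["timestamp"])
    let w0 : PySem.Dict Int (List Int) :=
      PySem.Dict.insert PySem.Dict.empty (pvUid (ss.getD 0 []))
        (PySem.Dict.getD (PySem.Dict.empty : PySem.Dict Int (List Int)) (pvUid (ss.getD 0 [])) []
          ++ [pvTs (ss.getD 0 [])])
    ((PySem.List.slice ss (some 1)).foldl (pvStepB limit milliseconds)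
      (w0, PySem.Set.empty)).2

-- ===== PRECONDITION & SPEC =====
-- Pre_ = exactly where A returns: with len(logs) >= limit, A raises KeyError when some
-- log lacks "userId"/"timestamp", IndexError on empty logs (limit <= 0), and IndexError
-- (left pointer past the end) whenever milliseconds < 0 and at least two logs exist.
def Pre_detectSpam (logs : List (List (String × Int))) (limit : Int) (milliseconds : Int) : Prop :=
  (logs.length : Int) < limit ∨
  (logs ≠ [] ∧
   (∀ d ∈ logs, (PySem.Dict.get? (⟨d⟩ : PySem.Dict String Int) "userId").isSome ∧ (PySem.Dict.get? (⟨d⟩ : PySem.Dict String Int) "timestamp").isSome) ∧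
   (logs.length = 1 ∨ 0 ≤ milliseconds))
instance (logs : List (List (String × Int))) (limit : Int) (milliseconds : Int) : Decidable (Pre_detectSpam logs limit milliseconds) := by unfold Pre_detectSpam; infer_instance

def pvWitness_detectSpam : (List (List (String × Int))) × Int × Int :=
  ([[("userId", 1), ("timestamp", 3)], [("userId", 1), ("timestamp", 4)]], 2, 5)

def Spec_detectSpam (logs : List (List (String × Int))) (limit : Int) (milliseconds : Int) (out : List Int) : Prop := out = detectSpam_alt logs limit milliseconds
instance (logs : List (List (String × Int))) (limit : Int) (milliseconds : Int) (out : List Int) : Decidable (Spec_detectSpam logs limit milliseconds out) := by unfold Spec_detectSpam; infer_instance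

-- ===== CLAIM (what is proved, stated in full; the proofs are below) =====
def Claim_equal_detectSpam : Prop := ∀ (logs : List (List (String × Int))) (limit : Int) (milliseconds : Int), Dom_detectSpam logs limit milliseconds → Pre_detectSpam logs limit milliseconds → Spec_detectSpam logs limit milliseconds (detectSpam logs limit milliseconds)

-- ===== LEMMAS AND PROOFS =====

-- uid / timestamp of the i-th sorted log (both ports read these through List.getD)
def idxU (ss : List (List (String × Int))) (i : Nat) : Int := pvUid (ss.getD i [])
def idxT (ss : List (List (String × Int))) (i : Nat) : Int := pvTs (ss.getD i [])

-- number of logs of user u among sorted indices l..b (A's window count)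
def winC (ss : List (List (String × Int))) (l b : Nat) (u : Int) : Nat :=
  (List.range' l (b + 1 - l)).countP (fun i => idxU ss i == u)

-- reference count at step r: logs of user U r among 0..r with timestamp ≥ T r - ms
def cntW (ss : List (List (String × Int))) (ms : Int) (r : Nat) : Nat :=
  (List.range (r + 1)).countP
    (fun i => (idxU ss i == idxU ss r) && decide (idxT ss r - ms ≤ idxT ss i))

-- timestamps of user u among sorted indices 0..r (B's full per-user history)
def tsl (ss : List (List (String × Int))) (u : Int) (r : Nat) : List Int :=
  ((List.range (r + 1)).filter (fun i => idxU ss i == u)).map (idxT ss)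

-- the flag sequence both loops realise
def specRes (ss : List (List (String × Int))) (limit ms : Int) (m : Nat) : PySem.Set Int :=
  (List.range' 1 m).foldl
    (fun res r => if limit ≤ (cntW ss ms r : Int) then PySem.Set.add res (idxU ss r) else res)
    PySem.Set.empty

theorem pyRange_one_natCast (n : Nat) :
    PySem.List.pyRange 1 (n : Int) = (List.range' 1 (n - 1)).map (fun i : Nat => (i : Int)) := by
  induction n with
  | zero => simp [PySem.List.pyRange]
  | succ n ih =>
    rcases Nat.eq_zero_or_pos n with h | h
    · subst h; simp [PySem.List.pyRange]
    · have h1 : (1 : Int) ≤ (n : Int) := by exact_mod_cast h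
      have : ((n + 1 : Nat) : Int) = (n : Int) + 1 := by push_cast; ring
      rw [this, PySem.List.pyRange_one_succ_right h1, ih]
      have h2 : n + 1 - 1 = (n - 1) + 1 := by omega
      rw [h2, List.range'_1_concat, List.map_append]
      simp
      omega

theorem drop_one_eq_map (ss : List (List (String × Int))) :
    ss.drop 1 = (List.range' 1 (ss.length - 1)).map (fun i => ss.getD i []) := by
  apply List.ext_getElem
  · simp
  · intro k h1 h2
    simp only [List.getElem_map, List.getElem_range'] at *
    rw [List.getElem_drop]
    rw [List.getD_eq_getElem]
    · simp [Nat.add_comm]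
    · simp at h1; omega

theorem pvPrune_eq_filter (θ : Int) :
    ∀ l : List Int, l.Pairwise (· ≤ ·) → pvPrune θ l = l.filter (fun t => decide (θ ≤ t)) := by
  intro l hl
  induction l with
  | nil => simp [pvPrune]
  | cons t rest ih =>
    rw [List.pairwise_cons] at hl
    by_cases h : t < θ
    · have : decide (θ ≤ t) = false := by simp; omega
      simp only [pvPrune, if_pos h, List.filter_cons, this]
      exact ih hl.2
    · have hd : decide (θ ≤ t) = true := by simp; omega
      simp only [pvPrune, if_neg h, List.filter_cons, hd, if_true]
      rw [List.filter_eq_self.mpr]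
      intro x hx
      have := hl.1 x hx
      simp; omega

theorem winC_pop (ss : List (List (String × Int))) {l b : Nat} (h : l ≤ b) (u : Int) :
    winC ss l b u =
      (if idxU ss l == u then 1 else 0) + winC ss (l + 1) b u := by
  unfold winC
  have h1 : b + 1 - l = (b - l) + 1 := by omega
  have h2 : b + 1 - (l + 1) = b - l := by omega
  rw [h1, h2, List.range'_succ, List.countP_cons]
  by_cases hu : idxU ss l == u <;> simp [hu, Nat.add_comm]

theorem winC_push (ss : List (List (String × Int))) {l b : Nat} (h : l ≤ b + 1) (u : Int) :
    winC ss l (b + 1) u =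
      winC ss l b u + (if idxU ss (b + 1) == u then 1 else 0) := by
  unfold winC
  have h1 : b + 1 + 1 - l = (b + 1 - l) + 1 := by omega
  rw [h1, List.range'_1_concat, List.countP_append]
  have h2 : l + (b + 1 - l) = b + 1 := by omega
  rw [h2]
  by_cases hu : idxU ss (b + 1) == u <;> simp [hu]

theorem winC_eq_cntW (ss : List (List (String × Int))) (ms : Int) {l r : Nat}
    (hlr : l ≤ r + 1)
    (hlo : ∀ i, i < l → idxT ss i < idxT ss r - ms)
    (hhi : ∀ i, l ≤ i → i ≤ r → idxT ss r - ms ≤ idxT ss i) :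
    winC ss l r (idxU ss r) = cntW ss ms r := by
  unfold winC cntW
  rw [List.range_eq_range']
  have hsplit : List.range' 0 (r + 1) = List.range' 0 l ++ List.range' l (r + 1 - l) := by
    have := List.range'_append (s := 0) (m := l) (n := r + 1 - l) (step := 1)
    simp only [Nat.one_mul, Nat.zero_add] at this
    rw [show r + 1 = l + (r + 1 - l) from by omega, ← this,
       show l + (r + 1 - l) - l = r + 1 - l from by omega]
  rw [hsplit, List.countP_append]
  have hz : (List.range' 0 l).countP
      (fun i => (idxU ss i == idxU ss r) && decide (idxT ss r - ms ≤ idxT ss i)) = 0 := by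
    apply List.countP_eq_zero.mpr
    intro i hi
    have : i < l := by
      have := List.mem_range'_1.mp hi
      omega
    have := hlo i this
    simp
    intro _
    omega
  rw [hz, Nat.zero_add]
  apply List.countP_congr
  intro i hi
  have hmem := List.mem_range'_1.mp hi
  have h1 : l ≤ i := hmem.1
  have h2 : i ≤ r := by omega
  have := hhi i h1 h2
  simp [this]

theorem pvWitness_ok :
    Dom_detectSpam pvWitness_detectSpam.1 pvWitness_detectSpam.2.1 pvWitness_detectSpam.2.2 ∧
    Pre_detectSpam pvWitness_detectSpam.1 pvWitness_detectSpam.2.1 pvWitness_detectSpam.2.2 := by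
  constructor <;> decide

theorem pvAdvance_spec (ss : List (List (String × Int))) (ms : Int) (hms : 0 ≤ ms) :
    ∀ (fuel l b : Nat) (counter : PySem.Dict Int Int),
      l ≤ b + 1 → b + 1 < ss.length → b + 1 - l < fuel →
      (∀ u, PySem.Dict.getD counter u 0 = (winC ss l b u : Int)) →
      l ≤ (pvAdvance ss (idxT ss (b+1)) ms fuel l counter).1 ∧
      (pvAdvance ss (idxT ss (b+1)) ms fuel l counter).1 ≤ b + 1 ∧
      (∀ i, l ≤ i → i < (pvAdvance ss (idxT ss (b+1)) ms fuel l counter).1 →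
        idxT ss i < idxT ss (b+1) - ms) ∧
      idxT ss (b+1) - ms ≤ idxT ss (pvAdvance ss (idxT ss (b+1)) ms fuel l counter).1 ∧
      (∀ u, PySem.Dict.getD (pvAdvance ss (idxT ss (b+1)) ms fuel l counter).2 u 0 =
        (winC ss (pvAdvance ss (idxT ss (b+1)) ms fuel l counter).1 b u : Int)) := by
  intro fuel
  induction fuel with
  | zero => intro l b counter _ _ hf; omega
  | succ fuel ih =>
    intro l b counter hlb hbn hf hc
    by_cases hcond : idxT ss (b+1) > pvTs (ss.getD l []) + ms
    · have hTl : pvTs (ss.getD l []) = idxT ss l := rfl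
      have hlb' : l ≠ b + 1 := by
        intro h; subst h
        rw [hTl] at hcond
        omega
      have hle : l ≤ b := by omega
      have hstep : pvAdvance ss (idxT ss (b+1)) ms (fuel+1) l counter =
          pvAdvance ss (idxT ss (b+1)) ms fuel (l+1)
            (PySem.Dict.insert counter (pvUid (ss.getD l []))
              (PySem.Dict.getD counter (pvUid (ss.getD l [])) 0 - 1)) := by
        rw [pvAdvance, if_pos hcond]
      have hc' : ∀ u, PySem.Dict.getD (PySem.Dict.insert counter (pvUid (ss.getD l []))
          (PySem.Dict.getD counter (pvUid (ss.getD l [])) 0 - 1)) u 0 =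
          (winC ss (l+1) b u : Int) := by
        intro u
        have hUl : pvUid (ss.getD l []) = idxU ss l := rfl
        rw [PySem.Dict.getD_insert, hUl, hc (idxU ss l)]
        by_cases hu : u = idxU ss l
        · subst hu
          rw [if_pos rfl, winC_pop ss hle, if_pos (by simp)]
          push_cast; ring
        · rw [if_neg hu, hc u, winC_pop ss hle u,
            if_neg (by simp; intro h; exact hu h.symm)]
          push_cast; ring
      obtain ⟨h1, h2, h3, h4, h5⟩ := ih (l+1) b _ (by omega) hbn (by omega) hc'
      rw [hstep]
      refine ⟨by omega, h2, ?_, h4, h5⟩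
      intro i hi1 hi2
      rcases Nat.lt_or_ge i (l+1) with h | h
      · have : i = l := by omega
        subst this
        rw [hTl] at hcond
        omega
      · exact h3 i h hi2
    · have hstep : pvAdvance ss (idxT ss (b+1)) ms (fuel+1) l counter = (l, counter) := by
        rw [pvAdvance, if_neg hcond]
      rw [hstep]
      have hTl : pvTs (ss.getD l []) = idxT ss l := rfl
      rw [hTl] at hcond
      exact ⟨le_refl l, hlb, fun i h1 (h2 : i < l) => by omega,
        (by omega : idxT ss (b+1) - ms ≤ idxT ss l), hc⟩

-- the initial state of A's loop (l = 0; counter = {U 0 : 1}; res = set())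
def pvInitA (ss : List (List (String × Int))) : Nat × PySem.Dict Int Int × PySem.Set Int :=
  (0, PySem.Dict.insert PySem.Dict.empty (pvUid (ss.getD 0 []))
        (PySem.Dict.getD (PySem.Dict.empty : PySem.Dict Int Int) (pvUid (ss.getD 0 [])) 0 + 1),
   PySem.Set.empty)

theorem loopA_spec (ss : List (List (String × Int))) (limit ms : Int) (hms : 0 ≤ ms)
    (hmono : ∀ i j : Nat, i ≤ j → j < ss.length → idxT ss i ≤ idxT ss j) :
    ∀ m, m < ss.length →
      (((List.range' 1 m).foldl (fun st (i : Nat) => pvStepA ss limit ms st (i : Int))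
          (pvInitA ss)).1 ≤ m ∧
      (∀ i, i < ((List.range' 1 m).foldl (fun st (i : Nat) => pvStepA ss limit ms st (i : Int))
          (pvInitA ss)).1 → idxT ss i < idxT ss m - ms) ∧
      (∀ u, PySem.Dict.getD ((List.range' 1 m).foldl (fun st (i : Nat) => pvStepA ss limit ms st (i : Int))
          (pvInitA ss)).2.1 u 0 =
        (winC ss ((List.range' 1 m).foldl (fun st (i : Nat) => pvStepA ss limit ms st (i : Int))
          (pvInitA ss)).1 m u : Int)) ∧
      ((List.range' 1 m).foldl (fun st (i : Nat) => pvStepA ss limit ms st (i : Int))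
          (pvInitA ss)).2.2 = specRes ss limit ms m) := by
  intro m
  induction m with
  | zero =>
    intro _
    refine ⟨le_refl 0, fun i (h : i < 0) => by omega, ?_, rfl⟩
    intro u
    show PySem.Dict.getD (PySem.Dict.insert PySem.Dict.empty (pvUid (ss.getD 0 []))
      (PySem.Dict.getD (PySem.Dict.empty : PySem.Dict Int Int) (pvUid (ss.getD 0 [])) 0 + 1)) u 0
      = (winC ss 0 0 u : Int)
    have hU : pvUid (ss.getD 0 []) = idxU ss 0 := rfl
    rw [hU, PySem.Dict.getD_insert, PySem.Dict.getD_empty]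
    have : winC ss 0 0 u = if idxU ss 0 == u then 1 else 0 := by
      unfold winC
      simp [List.range', List.countP_cons]
    rw [this]
    by_cases hu : u = idxU ss 0
    · subst hu; simp
    · rw [if_neg hu, if_neg (by simp; intro h; exact hu h.symm)]
      simp
  | succ m ih =>
    intro hmn
    obtain ⟨ih1, ih2, ih3, ih4⟩ := ih (by omega)
    set st := (List.range' 1 m).foldl (fun st (i : Nat) => pvStepA ss limit ms st (i : Int)) (pvInitA ss)
      with hst
    have hfold : (List.range' 1 (m+1)).foldl (fun st (i : Nat) => pvStepA ss limit ms st (i : Int))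
        (pvInitA ss) = pvStepA ss limit ms st ((m+1 : Nat) : Int) := by
      rw [List.range'_1_concat, List.foldl_append, ← hst]
      simp [Nat.add_comm]
    rw [hfold]
    have hidx : (((m+1 : Nat) : Int)).toNat = m + 1 := by simp
    obtain ⟨a1, a2, a3, a4, a5⟩ :=
      pvAdvance_spec ss ms hms ss.length st.1 m st.2.1 (by omega) hmn (by omega) ih3
    set lc := pvAdvance ss (idxT ss (m+1)) ms ss.length st.1 st.2.1 with hlc
    have hU : pvUid (ss.getD ((((m+1 : Nat)) : Int)).toNat []) = idxU ss (m+1) := by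
      rw [hidx]; rfl
    have hT : pvTs (ss.getD ((((m+1 : Nat)) : Int)).toNat []) = idxT ss (m+1) := by
      rw [hidx]; rfl
    have hstep : pvStepA ss limit ms st ((m+1 : Nat) : Int) =
        (lc.1, PySem.Dict.insert lc.2 (idxU ss (m+1))
            (PySem.Dict.getD lc.2 (idxU ss (m+1)) 0 + 1),
          if limit ≤ PySem.Dict.getD (PySem.Dict.insert lc.2 (idxU ss (m+1))
              (PySem.Dict.getD lc.2 (idxU ss (m+1)) 0 + 1)) (idxU ss (m+1)) 0
          then PySem.Set.add st.2.2 (idxU ss (m+1)) else st.2.2) := rfl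
    rw [hstep]
    -- the window bound for every i below the new left pointer
    have hwin : ∀ i, i < lc.1 → idxT ss i < idxT ss (m+1) - ms := by
      intro i hi
      rcases Nat.lt_or_ge i st.1 with h | h
      · have h1 := ih2 i h
        have h2 := hmono m (m+1) (by omega) hmn
        omega
      · exact a3 i h hi
    -- the new counter counts the new window
    have hcnt : ∀ u, PySem.Dict.getD (PySem.Dict.insert lc.2 (idxU ss (m+1))
        (PySem.Dict.getD lc.2 (idxU ss (m+1)) 0 + 1)) u 0 = (winC ss lc.1 (m+1) u : Int) := by
      intro u
      rw [PySem.Dict.getD_insert, a5 (idxU ss (m+1)), winC_push ss a2 u]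
      by_cases hu : u = idxU ss (m+1)
      · subst hu
        rw [if_pos rfl, if_pos (by simp)]
        push_cast; ring
      · rw [if_neg hu, a5 u, if_neg (by simp; intro h; exact hu h.symm)]
        push_cast; ring
    -- the counter value checked by A is the reference count
    have hflag : PySem.Dict.getD (PySem.Dict.insert lc.2 (idxU ss (m+1))
        (PySem.Dict.getD lc.2 (idxU ss (m+1)) 0 + 1)) (idxU ss (m+1)) 0 =
        (cntW ss ms (m+1) : Int) := by
      rw [hcnt (idxU ss (m+1))]
      congr 1
      apply winC_eq_cntW ss ms (by omega) hwin
      intro i h1 h2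
      have := hmono lc.1 i h1 (by omega)
      omega
    refine ⟨a2, hwin, hcnt, ?_⟩
    have hspec : specRes ss limit ms (m+1) =
        (if limit ≤ (cntW ss ms (m+1) : Int)
         then PySem.Set.add (specRes ss limit ms m) (idxU ss (m+1))
         else specRes ss limit ms m) := by
      unfold specRes
      rw [List.range'_1_concat, List.foldl_append]
      simp [Nat.add_comm]
    rw [hspec, hflag, ih4]

theorem tsl_pairwise (ss : List (List (String × Int)))
    (hmono : ∀ i j : Nat, i ≤ j → j < ss.length → idxT ss i ≤ idxT ss j)
    (u : Int) {r : Nat} (hr : r < ss.length) : (tsl ss u r).Pairwise (· ≤ ·) := by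
  unfold tsl
  rw [List.pairwise_map]
  apply List.Pairwise.sublist List.filter_sublist
  apply List.pairwise_iff_getElem.mpr
  intro i j hi hj hij
  rw [List.length_range] at hj
  simp only [List.getElem_range]
  exact hmono i j (by omega) (by omega)

theorem tsl_mem_le (ss : List (List (String × Int)))
    (hmono : ∀ i j : Nat, i ≤ j → j < ss.length → idxT ss i ≤ idxT ss j)
    (u : Int) {r : Nat} (hr : r + 1 < ss.length) :
    ∀ x ∈ tsl ss u r, x ≤ idxT ss (r + 1) := by
  intro x hx
  unfold tsl at hx
  obtain ⟨i, hi, rfl⟩ := List.mem_map.mp hx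
  have := List.mem_filter.mp hi
  have hir := List.mem_range.mp this.1
  exact hmono i (r+1) (by omega) hr

theorem tsl_succ (ss : List (List (String × Int))) (u : Int) (r : Nat) :
    tsl ss u (r + 1) =
      tsl ss u r ++ (if idxU ss (r+1) == u then [idxT ss (r+1)] else []) := by
  unfold tsl
  rw [List.range_succ, List.filter_append, List.map_append]
  by_cases h : idxU ss (r+1) == u <;> simp [h]

theorem filter_tsl_length (ss : List (List (String × Int))) (u θ : Int) (r : Nat) :
    ((tsl ss u r).filter (fun t => decide (θ ≤ t))).length =
      (List.range (r + 1)).countP (fun i => (idxU ss i == u) && decide (θ ≤ idxT ss i)) := by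
  unfold tsl
  rw [← List.countP_eq_length_filter, List.countP_map, List.countP_filter]
  apply List.countP_congr
  intro i _
  simp [Bool.and_comm]

-- the initial state of B's loop (windows = {U 0 : deque([T 0])}; res = set())
def pvInitB (ss : List (List (String × Int))) : PySem.Dict Int (List Int) × PySem.Set Int :=
  (PySem.Dict.insert PySem.Dict.empty (pvUid (ss.getD 0 []))
     (PySem.Dict.getD (PySem.Dict.empty : PySem.Dict Int (List Int)) (pvUid (ss.getD 0 [])) []
       ++ [pvTs (ss.getD 0 [])]),
   PySem.Set.empty)

theorem loopB_spec (ss : List (List (String × Int))) (limit ms : Int) (hms : 0 ≤ ms)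
    (hmono : ∀ i j : Nat, i ≤ j → j < ss.length → idxT ss i ≤ idxT ss j) :
    ∀ m, m < ss.length →
      (∀ u, ∃ θ : Int, θ ≤ idxT ss m - ms ∧
        PySem.Dict.getD ((List.range' 1 m).foldl
            (fun st (i : Nat) => pvStepB limit ms st (ss.getD i [])) (pvInitB ss)).1 u [] =
          (tsl ss u m).filter (fun t => decide (θ ≤ t))) ∧
      ((List.range' 1 m).foldl
          (fun st (i : Nat) => pvStepB limit ms st (ss.getD i [])) (pvInitB ss)).2 =
        specRes ss limit ms m := by
  intro m
  induction m with
  | zero =>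
    intro _
    refine ⟨?_, rfl⟩
    intro u
    refine ⟨idxT ss 0 - ms, le_refl _, ?_⟩
    show PySem.Dict.getD (PySem.Dict.insert PySem.Dict.empty (pvUid (ss.getD 0 []))
        (PySem.Dict.getD (PySem.Dict.empty : PySem.Dict Int (List Int)) (pvUid (ss.getD 0 [])) []
          ++ [pvTs (ss.getD 0 [])])) u [] = _
    have hU : pvUid (ss.getD 0 []) = idxU ss 0 := rfl
    have hT : pvTs (ss.getD 0 []) = idxT ss 0 := rfl
    rw [hU, hT, PySem.Dict.getD_insert, PySem.Dict.getD_empty]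
    have htsl0 : tsl ss u 0 = if idxU ss 0 == u then [idxT ss 0] else [] := by
      unfold tsl
      rw [List.range_one]
      by_cases h : idxU ss 0 == u <;> simp [h]
    by_cases hu : u = idxU ss 0
    · subst hu
      rw [if_pos rfl, htsl0, if_pos (by simp)]
      rw [List.filter_eq_self.mpr
        (by intro x hx; rw [List.mem_singleton] at hx; subst hx; simp; omega)]
      simp
    · rw [if_neg hu, htsl0, if_neg (by simp; intro h; exact hu h.symm)]
      simp
  | succ m ih =>
    intro hmn
    obtain ⟨ih1, ih2⟩ := ih (by omega)
    set st := (List.range' 1 m).foldl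
      (fun st (i : Nat) => pvStepB limit ms st (ss.getD i [])) (pvInitB ss) with hst
    have hfold : (List.range' 1 (m+1)).foldl
        (fun st (i : Nat) => pvStepB limit ms st (ss.getD i [])) (pvInitB ss) =
        pvStepB limit ms st (ss.getD (m+1) []) := by
      rw [List.range'_1_concat, List.foldl_append, ← hst]
      simp [Nat.add_comm]
    rw [hfold]
    obtain ⟨θ, hθ, hdq⟩ := ih1 (idxU ss (m+1))
    set dq := PySem.Dict.getD st.1 (idxU ss (m+1)) [] with hdqd
    set θs := idxT ss (m+1) - ms with hθs
    set dq2 := pvPrune θs (dq ++ [idxT ss (m+1)]) with hdq2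
    have hstep : pvStepB limit ms st (ss.getD (m+1) []) =
        (PySem.Dict.insert st.1 (idxU ss (m+1)) dq2,
         if limit ≤ (dq2.length : Int) then PySem.Set.add st.2 (idxU ss (m+1)) else st.2) := rfl
    rw [hstep]
    have hθθs : θ ≤ θs := by
      have := hmono m (m+1) (by omega) hmn
      omega
    -- the pruned deque is exactly the in-window timestamps of U (m+1) among 0..m+1
    have hdq2' : dq2 = (tsl ss (idxU ss (m+1)) (m+1)).filter (fun t => decide (θs ≤ t)) := by
      have hpw : (dq ++ [idxT ss (m+1)]).Pairwise (· ≤ ·) := by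
        rw [List.pairwise_append]
        refine ⟨?_, List.pairwise_singleton _ _, ?_⟩
        · rw [hdq]
          exact List.Pairwise.sublist List.filter_sublist
            (tsl_pairwise ss hmono _ (by omega))
        · intro x hx y hy
          rw [List.mem_singleton] at hy
          subst hy
          rw [hdq] at hx
          exact tsl_mem_le ss hmono _ hmn x (List.mem_of_mem_filter hx)
      rw [hdq2, pvPrune_eq_filter θs _ hpw, hdq, List.filter_append, List.filter_filter]
      have h1 : (tsl ss (idxU ss (m+1)) m).filter
          (fun a => decide (θs ≤ a) && decide (θ ≤ a)) =
          (tsl ss (idxU ss (m+1)) m).filter (fun a => decide (θs ≤ a)) := by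
        apply List.filter_congr
        intro x _
        by_cases h : θs ≤ x
        · simp [h]; omega
        · simp [h]
      have h2 : [idxT ss (m+1)].filter (fun t => decide (θs ≤ t)) = [idxT ss (m+1)] := by
        simp [hθs]; omega
      rw [h1, h2, tsl_succ, if_pos (by simp), List.filter_append, h2]
    refine ⟨?_, ?_⟩
    · intro u
      by_cases hu : u = idxU ss (m+1)
      · subst hu
        exact ⟨θs, le_refl _, by rw [PySem.Dict.getD_insert, if_pos rfl, hdq2']⟩
      · obtain ⟨θ', hθ', hdq'⟩ := ih1 u
        refine ⟨θ', by have := hmono m (m+1) (by omega) hmn; omega, ?_⟩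
        rw [PySem.Dict.getD_insert, if_neg hu, hdq']
        congr 1
        rw [tsl_succ, if_neg (by simp; intro h; exact hu h.symm), List.append_nil]
    · -- the flag test agrees with the reference count
      have hlen : (dq2.length : Int) = (cntW ss ms (m+1) : Int) := by
        rw [hdq2', filter_tsl_length]
        rfl
      have hspec : specRes ss limit ms (m+1) =
          (if limit ≤ (cntW ss ms (m+1) : Int)
           then PySem.Set.add (specRes ss limit ms m) (idxU ss (m+1))
           else specRes ss limit ms m) := by
        unfold specRes
        rw [List.range'_1_concat, List.foldl_append]
        simp [Nat.add_comm]
      rw [hlen, hspec, ih2]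

theorem detectSpam_eq (logs : List (List (String × Int))) (limit milliseconds : Int)
    (h : ¬ (logs.length : Int) < limit) :
    detectSpam logs limit milliseconds =
      ((PySem.List.pyRange 1 (logs.length : Int)).foldl
        (pvStepA (PySem.List.sorted logs (fun d => pvTs d)) limit milliseconds)
        (pvInitA (PySem.List.sorted logs (fun d => pvTs d)))).2.2 := by
  unfold detectSpam pvInitA
  rw [if_neg h]

theorem detectSpam_alt_eq (logs : List (List (String × Int))) (limit milliseconds : Int)
    (h : ¬ (logs.length : Int) < limit) :
    detectSpam_alt logs limit milliseconds =
      ((PySem.List.slice (PySem.List.sorted logs (fun d => pvTs d)) (some 1)).foldl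
        (pvStepB limit milliseconds)
        (pvInitB (PySem.List.sorted logs (fun d => pvTs d)))).2 := by
  unfold detectSpam_alt pvInitB
  rw [if_neg h]

theorem idxT_getElem (ss : List (List (String × Int))) (i : Nat) (h : i < ss.length) :
    idxT ss i = pvTs ss[i] := by
  unfold idxT
  rw [List.getD_eq_getElem _ _ h]

theorem idxT_sorted_mono (logs : List (List (String × Int))) :
    ∀ i j : Nat, i ≤ j → j < (PySem.List.sorted logs (fun d => pvTs d)).length →
      idxT (PySem.List.sorted logs (fun d => pvTs d)) i ≤
      idxT (PySem.List.sorted logs (fun d => pvTs d)) j := by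
  intro i j hij hj
  rw [idxT_getElem _ _ (by omega), idxT_getElem _ _ hj]
  exact PySem.List.key_sorted_getElem_mono logs (fun d => pvTs d) hij hj

-- ===== VERDICT (by name: the statement is the Claim_ definition above) =====
theorem detectSpam_spec : Claim_equal_detectSpam := by
  intro logs limit milliseconds _ hpre
  unfold Spec_detectSpam
  by_cases hg : (logs.length : Int) < limit
  · unfold detectSpam detectSpam_alt
    rw [if_pos hg, if_pos hg]
  · rcases hpre with h | ⟨hne, _, hcase⟩
    · exact absurd h hg
    rw [detectSpam_eq logs limit milliseconds hg, detectSpam_alt_eq logs limit milliseconds hg]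
    set ss := PySem.List.sorted logs (fun d => pvTs d) with hss
    have hlen : ss.length = logs.length := (PySem.List.sorted_perm logs _ _).length_eq
    have hn1 : 1 ≤ ss.length := by
      rw [hlen]
      exact List.length_pos_iff.mpr hne
    -- A's loop as a fold over the natural indices 1 .. len-1
    have hA : (PySem.List.pyRange 1 (logs.length : Int)).foldl
        (pvStepA ss limit milliseconds) (pvInitA ss) =
        (List.range' 1 (ss.length - 1)).foldl
          (fun st (i : Nat) => pvStepA ss limit milliseconds st (i : Int)) (pvInitA ss) := by
      rw [← hlen, pyRange_one_natCast, List.foldl_map]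
    -- B's loop as a fold over the same indices
    have hB : (PySem.List.slice ss (some 1)).foldl (pvStepB limit milliseconds) (pvInitB ss) =
        (List.range' 1 (ss.length - 1)).foldl
          (fun st (i : Nat) => pvStepB limit milliseconds st (ss.getD i [])) (pvInitB ss) := by
      rw [PySem.List.slice_from ss (by omega : (0:Int) ≤ 1)]
      have : (1 : Int).toNat = 1 := rfl
      rw [this, drop_one_eq_map, List.foldl_map]
    rw [hA, hB]
    rcases hcase with h1 | hms
    · -- a single log: both loops are empty
      have hz : ss.length - 1 = 0 := by rw [hlen, h1]
      rw [hz]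
      rfl
    · -- milliseconds ≥ 0: both loops realise the reference flag sequence
      have hmono := idxT_sorted_mono logs
      rw [← hss] at hmono
      have hm : ss.length - 1 < ss.length := by omega
      obtain ⟨_, _, _, hA4⟩ := loopA_spec ss limit milliseconds hms hmono (ss.length - 1) hm
      obtain ⟨_, hB2⟩ := loopB_spec ss limit milliseconds hms hmono (ss.length - 1) hm
      rw [hA4, hB2]
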